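-- pv_equiv track=rewrite | github.com/pypi-data/pypi-mirror-385 | packages/niti/niti-0.2.9.tar.gz/niti-0.2.9/niti/rules/class_traits.py | _class_has_trait_in_chain
-- ===== SOURCE A (Python) =====
-- from enum import Enum
-- from typing import Any, Dict, List
--
-- class ClassTrait(Enum):
--     """Enumeration of class trait concepts.
--
--     Every class should implement exactly one of these trait patterns
--     to clearly express its copying and moving semantics.
--     """
--
--     NON_COPYABLE_NON_MOVABLE = (
--         "NonCopyableNonMovable"  # Cannot be copied or moved
--     )
--     NON_COPYABLE = "NonCopyable"  # Can be moved but not copied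
--     NON_MOVABLE = "NonMovable"  # Can be copied but not moved
--     COPYABLE_MOVABLE = (
--         "CopyableMovable"  # Can be both copied and moved (default)
--     )
--
--     def __str__(self) -> str:
--         return self.value
--
-- def _class_has_trait_in_chain(
--     class_name: str, inheritance_graph: Dict[str, List[str]]
-- ) -> bool:
--     """Recursively check if class inherits from any trait base class."""
--     visited = set()
--
--     def check_inheritance_chain(current_class: str) -> bool:
--         if current_class in visited:
--             return False  # Avoid infinite loops
--         visited.add(current_class)
--
--         # Check if current class is a trait base class
--         if current_class in [trait.value for trait in ClassTrait]:
--             return True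
--
--         # Recursively check base classes
--         base_classes = inheritance_graph.get(current_class, [])
--         for base_class in base_classes:
--             if check_inheritance_chain(base_class):
--                 return True
--
--         return False
--
--     return check_inheritance_chain(class_name)
-- ===== SOURCE B (Python) =====
-- from enum import Enum
-- from typing import Dict, List
--
-- class ClassTrait(Enum):
--     NON_COPYABLE_NON_MOVABLE = "NonCopyableNonMovable"
--     NON_COPYABLE = "NonCopyable"
--     NON_MOVABLE = "NonMovable"
--     COPYABLE_MOVABLE = "CopyableMovable"
--
--     def __str__(self) -> str:
--         return self.value
--
--
-- def _class_has_trait_in_chain(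
--     class_name: str, inheritance_graph: Dict[str, List[str]]
-- ) -> bool:
--     """Iteratively check if class inherits from any trait base class."""
--     trait_values = [trait.value for trait in ClassTrait]
--     stack = [class_name]
--     visited = set()
--     while stack:
--         node = stack.pop()
--         if node in visited:
--             continue
--         visited.add(node)
--         if node in trait_values:
--             return True
--         stack.extend(inheritance_graph.get(node, []))
--     return False
-- ===== Notes on version B (the rewrite author's own statement) =====
-- stated objective: alternative
-- what changed: The inner recursive helper with a shared visited set is replaced by an iterative DFS with an explicit stack and a visited set maintained in the single while loop; the boolean reachability result is order-independent, so the outputs coincide.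
import Mathlib
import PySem

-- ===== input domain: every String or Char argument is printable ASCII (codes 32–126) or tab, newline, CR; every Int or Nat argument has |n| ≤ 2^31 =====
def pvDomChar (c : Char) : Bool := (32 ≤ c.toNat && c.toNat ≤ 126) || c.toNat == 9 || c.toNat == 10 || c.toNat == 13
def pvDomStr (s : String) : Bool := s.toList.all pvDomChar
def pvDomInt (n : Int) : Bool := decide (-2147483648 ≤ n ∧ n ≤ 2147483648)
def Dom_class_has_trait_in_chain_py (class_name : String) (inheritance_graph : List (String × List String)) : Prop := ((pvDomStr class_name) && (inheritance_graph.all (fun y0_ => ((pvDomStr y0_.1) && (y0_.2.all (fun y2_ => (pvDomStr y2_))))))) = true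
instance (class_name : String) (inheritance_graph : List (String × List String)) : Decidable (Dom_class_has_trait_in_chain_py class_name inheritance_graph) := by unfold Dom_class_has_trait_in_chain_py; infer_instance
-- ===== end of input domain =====

-- B replaces A's inner recursive helper by an iterative DFS with an explicit stack;
-- the equivalence proved below is about the return value (neither version mutates its arguments).

-- ===== PORT A =====
-- [trait.value for trait in ClassTrait]
def pvTraits : List String := ["NonCopyableNonMovable", "NonCopyable", "NonMovable", "CopyableMovable"]

-- inheritance_graph.get(current_class, [])
def pvSucc (g : List (String × List String)) (c : String) : List String :=
  (PySem.Dict.mk g).getD c []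

-- every name the search can ever visit (used only as a provably sufficient fuel bound)
def pvNodes (cn : String) (g : List (String × List String)) : List String :=
  cn :: g.flatMap (fun p => p.1 :: p.2)

mutual
-- check_inheritance_chain(current_class), visited threaded through; fuel only makes it total
def pvCheckA (g : List (String × List String)) : Nat → String → PySem.Set String → Bool × PySem.Set String
  | 0, _, V => (false, V)
  | fuel + 1, c, V =>
    if c ∈ V then (false, V)
    else
      let V1 := PySem.Set.add V c
      if c ∈ pvTraits then (true, V1)
      else pvLoopA g fuel (pvSucc g c) V1
  termination_by fuel _ _ => (fuel, 0)
-- the 'for base_class in base_classes' loop with early return True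
def pvLoopA (g : List (String × List String)) : Nat → List String → PySem.Set String → Bool × PySem.Set String
  | _, [], V => (false, V)
  | fuel, b :: bs, V =>
    match pvCheckA g fuel b V with
    | (true, V') => (true, V')
    | (false, V') => pvLoopA g fuel bs V'
  termination_by fuel bs _ => (fuel, bs.length + 1)
end

def class_has_trait_in_chain_py (class_name : String) (inheritance_graph : List (String × List String)) : Bool :=
  (pvCheckA inheritance_graph ((pvNodes class_name inheritance_graph).length + 1) class_name PySem.Set.empty).1

-- ===== PORT B =====
-- while stack: node = stack.pop(); …  (stack modeled head-first, so extend pushes the reversed list; fuel only makes it total)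
def pvLoopB (g : List (String × List String)) : Nat → List String → PySem.Set String → Bool
  | 0, _, _ => false
  | _ + 1, [], _ => false
  | fuel + 1, n :: stack, V =>
    if n ∈ V then pvLoopB g fuel stack V
    else
      let V1 := PySem.Set.add V n
      if n ∈ pvTraits then true
      else pvLoopB g fuel ((pvSucc g n).reverse ++ stack) V1

def class_has_trait_in_chain_py_alt (class_name : String) (inheritance_graph : List (String × List String)) : Bool :=
  pvLoopB inheritance_graph
    ((pvNodes class_name inheritance_graph).length * ((inheritance_graph.flatMap (fun p => p.2)).length + 1) + 2)
    [class_name] PySem.Set.empty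

-- ===== PRECONDITION & SPEC =====
def Spec_class_has_trait_in_chain_py (class_name : String) (inheritance_graph : List (String × List String)) (out : Bool) : Prop := out = class_has_trait_in_chain_py_alt class_name inheritance_graph
instance (class_name : String) (inheritance_graph : List (String × List String)) (out : Bool) : Decidable (Spec_class_has_trait_in_chain_py class_name inheritance_graph out) := by unfold Spec_class_has_trait_in_chain_py; infer_instance

-- ===== CLAIM (what is proved, stated in full; the proofs are below) =====
def Claim_equal_class_has_trait_in_chain_py : Prop := ∀ (class_name : String) (inheritance_graph : List (String × List String)), Dom_class_has_trait_in_chain_py class_name inheritance_graph → Spec_class_has_trait_in_chain_py class_name inheritance_graph (class_has_trait_in_chain_py class_name inheritance_graph)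

-- ===== LEMMAS AND PROOFS =====

-- reachability along the inheritance graph
inductive pvReaches (g : List (String × List String)) : String → String → Prop where
  | refl (x : String) : pvReaches g x x
  | step {x y z : String} : y ∈ pvSucc g x → pvReaches g y z → pvReaches g x z

-- "some trait base is reachable from x"
def pvRT (g : List (String × List String)) (x : String) : Prop :=
  ∃ t, pvReaches g x t ∧ t ∈ pvTraits

-- the nodes newly recorded between visited-states V and V' are trait-free and successor-closed in V'
def pvNC (g : List (String × List String)) (V V' : List String) : Prop :=
  ∀ x ∈ V', x ∉ V → x ∉ pvTraits ∧ ∀ y ∈ pvSucc g x, y ∈ V'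

-- number of not-yet-visited entries of N
def pvUn (N V : List String) : Nat := N.countP (fun x => decide (x ∉ V))

lemma pvSucc_cases (g : List (String × List String)) (c : String) :
    pvSucc g c = [] ∨ ∃ p ∈ g, pvSucc g c = p.2 := by
  induction g with
  | nil => left; rfl
  | cons q rest ih =>
    obtain ⟨k, vs⟩ := q
    by_cases hq : (k == c) = true
    · right
      refine ⟨(k, vs), by simp, ?_⟩
      simp [pvSucc, PySem.Dict.getD_eq_get?_getD, PySem.Dict.get?_mk_cons, hq]
    · have h : pvSucc ((k, vs) :: rest) c = pvSucc rest c := by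
        simp [pvSucc, PySem.Dict.getD_eq_get?_getD, PySem.Dict.get?_mk_cons, hq]
      rw [h]
      rcases ih with h0 | ⟨p, hp, he⟩
      · left; exact h0
      · right; exact ⟨p, by simp [hp], he⟩

lemma pvSucc_mem_nodes {g : List (String × List String)} {c x : String} (cn : String)
    (hx : x ∈ pvSucc g c) : x ∈ pvNodes cn g := by
  rcases pvSucc_cases g c with h | ⟨p, hp, he⟩
  · rw [h] at hx; cases hx
  · rw [he] at hx
    simp only [pvNodes, List.mem_cons, List.mem_flatMap]
    exact Or.inr ⟨p, hp, by simp [hx]⟩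

lemma pvSucc_len_le {g : List (String × List String)} (c : String) :
    (pvSucc g c).length ≤ (g.flatMap (fun p => p.2)).length := by
  rcases pvSucc_cases g c with h | ⟨p, hp, he⟩
  · simp [h]
  · rw [he]
    obtain ⟨s, t, rfl⟩ := List.append_of_mem hp
    simp [List.flatMap_append]
    omega

lemma pvUn_mono {N V V' : List String} (h : V ⊆ V') : pvUn N V' ≤ pvUn N V := by
  apply List.countP_mono_left
  intro x _ hx
  simp only [decide_eq_true_eq] at *
  exact fun hm => hx (h hm)

lemma pvUn_lt {N V : List String} {c : String} (hc : c ∈ N) (hv : c ∉ V) :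
    pvUn N (PySem.Set.add V c) < pvUn N V := by
  rw [PySem.Set.add_of_not_mem hv]
  obtain ⟨s, t, rfl⟩ := List.append_of_mem hc
  simp only [pvUn, List.countP_append, List.countP_cons]
  have h1 : ∀ M : List String, M.countP (fun x => decide (x ∉ V ++ [c])) ≤
      M.countP (fun x => decide (x ∉ V)) := by
    intro M
    apply List.countP_mono_left
    intro x _ hx
    simp only [List.mem_append, List.mem_singleton, decide_eq_true_eq] at *
    exact fun hm => hx (Or.inl hm)
  have h2 := h1 s
  have h3 := h1 t
  have hc1 : (decide (c ∉ V ++ [c]) : Bool) = false := by simp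
  have hc2 : (decide (c ∉ V) : Bool) = true := by simpa using hv
  rw [hc1, hc2]
  simp only [Bool.false_eq_true, if_false, if_true]
  omega

lemma pvUn_le_len (N V : List String) : pvUn N V ≤ N.length :=
  List.countP_le_length

lemma pvNC_trans {g : List (String × List String)} {V V' V'' : List String}
    (h1 : pvNC g V V') (h2 : pvNC g V' V'') (hs : V' ⊆ V'') :
    pvNC g V V'' := by
  intro x hx hxv
  by_cases hm : x ∈ V'
  · obtain ⟨ht, hsc⟩ := h1 x hm hxv
    exact ⟨ht, fun y hy => hs (hsc y hy)⟩
  · exact h2 x hx hm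

lemma pvReaches_closed {g : List (String × List String)} {V' : List String} {x t : String}
    (hcl : pvNC g [] V') (hr : pvReaches g x t) : x ∈ V' → t ∈ V' := by
  induction hr with
  | refl x => exact id
  | step hy _ ih => exact fun hx => ih ((hcl _ hx (by simp)).2 _ hy)

lemma pvClosed_not_RT {g : List (String × List String)} {V' : List String} {c : String}
    (hcl : pvNC g [] V') (hc : c ∈ V') : ¬ pvRT g c := by
  rintro ⟨t, hr, ht⟩
  exact (hcl t (pvReaches_closed hcl hr hc) (by simp)).1 ht

-- the combined invariant for A's recursion, by induction on fuel
lemma pvA_spec (g : List (String × List String)) (N : List String)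
    (hNs : ∀ c x, x ∈ pvSucc g c → x ∈ N) :
    ∀ fuel : Nat,
      (∀ c V, c ∈ N → pvUn N V < fuel →
        V ⊆ (pvCheckA g fuel c V).2 ∧
        ((pvCheckA g fuel c V).1 = true → pvRT g c) ∧
        ((pvCheckA g fuel c V).1 = false →
          c ∈ (pvCheckA g fuel c V).2 ∧ pvNC g V (pvCheckA g fuel c V).2)) ∧
      (∀ bs V, (∀ b ∈ bs, b ∈ N) → pvUn N V < fuel →
        V ⊆ (pvLoopA g fuel bs V).2 ∧
        ((pvLoopA g fuel bs V).1 = true → ∃ x ∈ bs, pvRT g x) ∧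
        ((pvLoopA g fuel bs V).1 = false →
          pvNC g V (pvLoopA g fuel bs V).2 ∧ ∀ b ∈ bs, b ∈ (pvLoopA g fuel bs V).2)) := by
  intro fuel
  induction fuel with
  | zero => exact ⟨fun c V _ h => absurd h (by omega), fun bs V _ h => absurd h (by omega)⟩
  | succ m ih =>
    have hck : ∀ c V, c ∈ N → pvUn N V < m + 1 →
        V ⊆ (pvCheckA g (m + 1) c V).2 ∧
        ((pvCheckA g (m + 1) c V).1 = true → pvRT g c) ∧
        ((pvCheckA g (m + 1) c V).1 = false →
          c ∈ (pvCheckA g (m + 1) c V).2 ∧ pvNC g V (pvCheckA g (m + 1) c V).2) := by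
      intro c V hcN hU
      by_cases hv : c ∈ V
      · simp only [pvCheckA, if_pos hv]
        exact ⟨List.Subset.refl _, by simp, fun _ => ⟨hv, fun x hx hxv => (hxv hx).elim⟩⟩
      · by_cases ht : c ∈ pvTraits
        · simp only [pvCheckA, if_neg hv, if_pos ht]
          refine ⟨?_, fun _ => ⟨c, pvReaches.refl c, ht⟩, by simp⟩
          intro x hx
          rw [PySem.Set.add_of_not_mem hv]; exact List.mem_append_left _ hx
        · have hU1 : pvUn N (PySem.Set.add V c) < m :=
            Nat.lt_of_lt_of_le (pvUn_lt hcN hv) (by omega)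
          have hbs : ∀ b ∈ pvSucc g c, b ∈ N := fun b hb => hNs c b hb
          obtain ⟨hsub, htr, hfa⟩ := (ih).2 (pvSucc g c) (PySem.Set.add V c) hbs hU1
          simp only [pvCheckA, if_neg hv, if_neg ht]
          have hVV1 : V ⊆ PySem.Set.add V c := by
            rw [PySem.Set.add_of_not_mem hv]; exact List.subset_append_left _ _
          refine ⟨hVV1.trans hsub, ?_, ?_⟩
          · intro h1
            obtain ⟨x, hx, hrt⟩ := htr h1
            obtain ⟨t, hr, htt⟩ := hrt
            exact ⟨t, pvReaches.step hx hr, htt⟩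
          · intro h0
            obtain ⟨hnc, hall⟩ := hfa h0
            have hcmem : c ∈ (pvLoopA g m (pvSucc g c) (PySem.Set.add V c)).2 :=
              hsub (by rw [PySem.Set.add_of_not_mem hv]; simp)
            refine ⟨hcmem, ?_⟩
            intro x hx hxv
            by_cases hxc : x = c
            · subst hxc
              exact ⟨ht, fun y hy => hall y hy⟩
            · have hx1 : x ∉ PySem.Set.add V c := by
                rw [PySem.Set.add_of_not_mem hv]
                simp only [List.mem_append, List.mem_singleton]
                rintro (h | h) <;> [exact hxv h; exact hxc h]
              exact hnc x hx hx1
    refine ⟨hck, ?_⟩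
    intro bs
    induction bs with
    | nil =>
      intro V _ _
      simp only [pvLoopA]
      exact ⟨List.Subset.refl _, by simp, fun _ => ⟨fun x hx hxv => (hxv hx).elim, by simp⟩⟩
    | cons b bs ihbs =>
      intro V hbsN hU
      obtain ⟨hsub, htr, hfa⟩ := hck b V (hbsN b (by simp)) hU
      rcases hres : pvCheckA g (m + 1) b V with ⟨bb, V'⟩
      rw [hres] at hsub htr hfa
      simp only at hsub htr hfa
      cases bb with
      | true =>
        simp only [pvLoopA, hres]
        exact ⟨hsub, fun _ => ⟨b, by simp, htr rfl⟩, by simp⟩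
      | false =>
        obtain ⟨hbmem, hnc1⟩ := hfa rfl
        have hU' : pvUn N V' < m + 1 := Nat.lt_of_le_of_lt (pvUn_mono hsub) hU
        obtain ⟨hsub2, htr2, hfa2⟩ := ihbs V' (fun x hx => hbsN x (by simp [hx])) hU'
        simp only [pvLoopA, hres]
        refine ⟨hsub.trans hsub2, ?_, ?_⟩
        · intro h1
          obtain ⟨x, hx, hrt⟩ := htr2 h1
          exact ⟨x, by simp [hx], hrt⟩
        · intro h0
          obtain ⟨hnc2, hall2⟩ := hfa2 h0
          refine ⟨pvNC_trans hnc1 hnc2 hsub2, ?_⟩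
          intro x hx
          rcases List.mem_cons.mp hx with rfl | hx'
          · exact hsub2 hbmem
          · exact hall2 x hx'

-- the combined invariant for B's stack loop, by induction on fuel
lemma pvB_spec (g : List (String × List String)) (N : List String)
    (hNs : ∀ c x, x ∈ pvSucc g c → x ∈ N) :
    ∀ (fuel : Nat) (stack : List String) (V : PySem.Set String),
      (∀ x ∈ stack, x ∈ N) →
      stack.length + pvUn N V * ((g.flatMap (fun p => p.2)).length + 1) < fuel →
      ((pvLoopB g fuel stack V = true → ∃ x ∈ stack, pvRT g x) ∧
       (pvLoopB g fuel stack V = false → ∃ V', V ⊆ V' ∧ pvNC g V V' ∧ ∀ x ∈ stack, x ∈ V')) := by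
  intro fuel
  induction fuel with
  | zero => intro stack V _ h; omega
  | succ m ih =>
    intro stack V hstN hF
    cases stack with
    | nil =>
      exact ⟨by simp [pvLoopB], fun _ => ⟨V, List.Subset.refl _, fun x hx hxv => (hxv hx).elim, by simp⟩⟩
    | cons n rest =>
      by_cases hv : n ∈ V
      · simp only [pvLoopB, if_pos hv]
        have hF' : rest.length + pvUn N V * ((g.flatMap (fun p => p.2)).length + 1) < m := by
          simp only [List.length_cons] at hF; omega
        obtain ⟨h1, h0⟩ := ih rest V (fun x hx => hstN x (by simp [hx])) hF'
        refine ⟨fun h => ?_, fun h => ?_⟩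
        · obtain ⟨x, hx, hrt⟩ := h1 h
          exact ⟨x, by simp [hx], hrt⟩
        · obtain ⟨V', hs, hnc, hall⟩ := h0 h
          refine ⟨V', hs, hnc, ?_⟩
          intro x hx
          rcases List.mem_cons.mp hx with rfl | hx'
          · exact hs hv
          · exact hall x hx'
      · have hnN : n ∈ N := hstN n (by simp)
        by_cases ht : n ∈ pvTraits
        · simp only [pvLoopB, if_neg hv, if_pos ht]
          exact ⟨fun _ => ⟨n, by simp, n, pvReaches.refl n, ht⟩, by simp⟩
        · simp only [pvLoopB, if_neg hv, if_neg ht]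
          have hU1 : pvUn N (PySem.Set.add V n) + 1 ≤ pvUn N V := pvUn_lt hnN hv
          have hlen : (pvSucc g n).length ≤ (g.flatMap (fun p => p.2)).length := pvSucc_len_le n
          have hF' : ((pvSucc g n).reverse ++ rest).length +
              pvUn N (PySem.Set.add V n) * ((g.flatMap (fun p => p.2)).length + 1) < m := by
            simp only [List.length_append, List.length_reverse, List.length_cons] at *
            nlinarith
          have hstN' : ∀ x ∈ (pvSucc g n).reverse ++ rest, x ∈ N := by
            intro x hx
            rcases List.mem_append.mp hx with hx' | hx'
            · exact hNs n x (List.mem_reverse.mp hx')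
            · exact hstN x (by simp [hx'])
          obtain ⟨h1, h0⟩ := ih _ (PySem.Set.add V n) hstN' hF'
          have hVV1 : V ⊆ PySem.Set.add V n := by
            rw [PySem.Set.add_of_not_mem hv]; exact List.subset_append_left _ _
          refine ⟨fun h => ?_, fun h => ?_⟩
          · obtain ⟨x, hx, hrt⟩ := h1 h
            rcases List.mem_append.mp hx with hx' | hx'
            · obtain ⟨t, hr, htt⟩ := hrt
              exact ⟨n, by simp, t, pvReaches.step (List.mem_reverse.mp hx') hr, htt⟩
            · exact ⟨x, by simp [hx'], hrt⟩
          · obtain ⟨V', hs, hnc, hall⟩ := h0 h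
            have hnV' : n ∈ V' := hs (by rw [PySem.Set.add_of_not_mem hv]; simp)
            refine ⟨V', hVV1.trans hs, ?_, ?_⟩
            · intro x hx hxv
              by_cases hxn : x = n
              · subst hxn
                refine ⟨ht, fun y hy => hall y ?_⟩
                exact List.mem_append_left _ (List.mem_reverse.mpr hy)
              · have hx1 : x ∉ PySem.Set.add V n := by
                  rw [PySem.Set.add_of_not_mem hv]
                  simp only [List.mem_append, List.mem_singleton]
                  rintro (hh | hh) <;> [exact hxv hh; exact hxn hh]
                exact hnc x hx hx1
            · intro x hx
              rcases List.mem_cons.mp hx with rfl | hx'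
              · exact hnV'
              · exact hall x (List.mem_append_right _ hx')

lemma pvA_iff (cn : String) (g : List (String × List String)) :
    class_has_trait_in_chain_py cn g = true ↔ pvRT g cn := by
  have hNs : ∀ c x, x ∈ pvSucc g c → x ∈ pvNodes cn g := fun c x hx => pvSucc_mem_nodes cn hx
  have hU : pvUn (pvNodes cn g) PySem.Set.empty < (pvNodes cn g).length + 1 := by
    have := pvUn_le_len (pvNodes cn g) PySem.Set.empty
    omega
  obtain ⟨_, htr, hfa⟩ := (pvA_spec g (pvNodes cn g) hNs ((pvNodes cn g).length + 1)).1
    cn PySem.Set.empty (by simp [pvNodes]) hU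
  unfold class_has_trait_in_chain_py
  constructor
  · exact htr
  · intro hrt
    by_contra hne
    have h0 : (pvCheckA g ((pvNodes cn g).length + 1) cn PySem.Set.empty).1 = false := by
      cases h : (pvCheckA g ((pvNodes cn g).length + 1) cn PySem.Set.empty).1
      · rfl
      · exact absurd h hne
    obtain ⟨hcm, hnc⟩ := hfa h0
    exact pvClosed_not_RT hnc hcm hrt

lemma pvB_iff (cn : String) (g : List (String × List String)) :
    class_has_trait_in_chain_py_alt cn g = true ↔ pvRT g cn := by
  have hNs : ∀ c x, x ∈ pvSucc g c → x ∈ pvNodes cn g := fun c x hx => pvSucc_mem_nodes cn hx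
  have hF : ([cn] : List String).length +
      pvUn (pvNodes cn g) PySem.Set.empty * ((g.flatMap (fun p => p.2)).length + 1) <
      (pvNodes cn g).length * ((g.flatMap (fun p => p.2)).length + 1) + 2 := by
    have h1 := pvUn_le_len (pvNodes cn g) PySem.Set.empty
    have h2 : pvUn (pvNodes cn g) PySem.Set.empty * ((g.flatMap (fun p => p.2)).length + 1) ≤
        (pvNodes cn g).length * ((g.flatMap (fun p => p.2)).length + 1) :=
      Nat.mul_le_mul_right _ h1
    simp only [List.length_cons, List.length_nil]
    omega
  obtain ⟨h1, h0⟩ := pvB_spec g (pvNodes cn g) hNs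
    ((pvNodes cn g).length * ((g.flatMap (fun p => p.2)).length + 1) + 2)
    [cn] PySem.Set.empty (by simp [pvNodes]) hF
  unfold class_has_trait_in_chain_py_alt
  constructor
  · intro h
    obtain ⟨x, hx, hrt⟩ := h1 h
    simp only [List.mem_singleton] at hx
    subst hx; exact hrt
  · intro hrt
    by_contra hne
    have h00 : pvLoopB g ((pvNodes cn g).length * ((g.flatMap (fun p => p.2)).length + 1) + 2)
        [cn] PySem.Set.empty = false := by
      cases h : pvLoopB g ((pvNodes cn g).length * ((g.flatMap (fun p => p.2)).length + 1) + 2)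
        [cn] PySem.Set.empty
      · rfl
      · exact absurd h hne
    obtain ⟨V', _, hnc, hall⟩ := h0 h00
    exact pvClosed_not_RT hnc (hall cn (by simp)) hrt

-- ===== VERDICT (by name: the statement is the Claim_ definition above) =====
theorem class_has_trait_in_chain_py_spec : Claim_equal_class_has_trait_in_chain_py := by
  intro cn g _
  unfold Spec_class_has_trait_in_chain_py
  have hA := pvA_iff cn g
  have hB := pvB_iff cn g
  by_cases h : pvRT g cn
  · rw [hA.mpr h, hB.mpr h]
  · cases hA' : class_has_trait_in_chain_py cn g with
    | true => exact absurd (hA.mp hA') h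
    | false =>
      cases hB' : class_has_trait_in_chain_py_alt cn g with
      | true => exact absurd (hB.mp hB') h
      | false => rfl
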